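-- pv_equiv track=rewrite | github.com/anejaa/Delo-s-slikami | naloga1.py | zdruzi_sosednje_skatle
-- ===== SOURCE A (Python) =====
-- def zdruzi_sosednje_skatle(skatle, max_razdalja=70):
--     if not skatle:
--         return []
--     zdruzeni = [skatle[0]]
--     for trenutna in skatle[1:]:
--         zdruzeno = False
--         for i, z in enumerate(zdruzeni): # hkrati dostop do indexa in vrednosti
--             if so_sosednje(trenutna[0], z[0], max_razdalja):
--                 nova_skatla = zdruzi([trenutna, z])
--                 zdruzeni[i] = (nova_skatla, 0)
--                 zdruzeno = True
--                 break
--         if not zdruzeno: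
--             zdruzeni.append(trenutna)
--     return zdruzeni
--
-- def so_sosednje(skatla1, skatla2, max_razdalja):
--     x1, y1, _, _ = skatla1
--     x2, y2, _, _ = skatla2
--     razdalja = max(abs(x1-x2), abs(y1-y2))
--     return razdalja <= max_razdalja
--
-- def zdruzi(skatli):
--     x_coords = [skatla[0][0] for skatla in skatli]  # x koordinata vseh škatel v seznamu
--     y_coords = [skatla[0][1] for skatla in skatli]  # x koordinata vseh škatel v seznamu
--
--     widths = [skatla[0][2] for skatla in skatli]
--     heights = [skatla[0][3] for skatla in skatli]  # širine in višine škatel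
--
--     x_min = min(x_coords)  # najdem minimume in maximume
--     y_min = min(y_coords)
--
--     x_max = max(x_coords) + max(widths)
--     y_max = max(y_coords) + max(heights)
--     return x_min, y_min, x_max - x_min, y_max - y_min
-- ===== SOURCE B (Python) =====
-- def zdruzi_sosednje_skatle(skatle, max_razdalja=70):
--     # Spatial hash grid: groups are bucketed by the cell of their (x, y) corner,
--     # cell size s >= max_razdalja, so any group adjacent to the incoming box lies
--     # in one of the 9 neighbouring cells; pick the smallest group index among them.
--     s = max_razdalja if max_razdalja > 0 else 1
--     groups = []
--     grid = {}  # cell -> list of group indices whose corner lies in that cell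
--     for trenutna in skatle:
--         x, y, w, h = trenutna[0]
--         cx, cy = x // s, y // s
--         cands = [i
--                  for dx in (-1, 0, 1) for dy in (-1, 0, 1)
--                  for i in grid.get((cx + dx, cy + dy), [])
--                  if max(abs(x - groups[i][0][0]), abs(y - groups[i][0][1])) <= max_razdalja]
--         if cands:
--             i = min(cands)
--             gx, gy, gw, gh = groups[i][0]
--             nx, ny = min(x, gx), min(y, gy)
--             merged = (nx, ny, max(x, gx) + max(w, gw) - nx, max(y, gy) + max(h, gh) - ny)
--             grid[(gx // s, gy // s)].remove(i)
--             grid.setdefault((nx // s, ny // s), []).append(i)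
--             groups[i] = (merged, 0)
--         else:
--             grid.setdefault((cx, cy), []).append(len(groups))
--             groups.append(trenutna)
--     return groups
-- ===== Notes on version B (the rewrite author's own statement) =====
-- stated objective: faster
-- what changed: B replaces A's inner linear scan over all existing groups with a spatial hash grid (cell size = max(max_razdalja,1)) keyed by each group's (x,y) corner, so only the 9 neighbouring cells are inspected and the smallest matching group index is taken, which equals A's first-match index.
import Mathlib
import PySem

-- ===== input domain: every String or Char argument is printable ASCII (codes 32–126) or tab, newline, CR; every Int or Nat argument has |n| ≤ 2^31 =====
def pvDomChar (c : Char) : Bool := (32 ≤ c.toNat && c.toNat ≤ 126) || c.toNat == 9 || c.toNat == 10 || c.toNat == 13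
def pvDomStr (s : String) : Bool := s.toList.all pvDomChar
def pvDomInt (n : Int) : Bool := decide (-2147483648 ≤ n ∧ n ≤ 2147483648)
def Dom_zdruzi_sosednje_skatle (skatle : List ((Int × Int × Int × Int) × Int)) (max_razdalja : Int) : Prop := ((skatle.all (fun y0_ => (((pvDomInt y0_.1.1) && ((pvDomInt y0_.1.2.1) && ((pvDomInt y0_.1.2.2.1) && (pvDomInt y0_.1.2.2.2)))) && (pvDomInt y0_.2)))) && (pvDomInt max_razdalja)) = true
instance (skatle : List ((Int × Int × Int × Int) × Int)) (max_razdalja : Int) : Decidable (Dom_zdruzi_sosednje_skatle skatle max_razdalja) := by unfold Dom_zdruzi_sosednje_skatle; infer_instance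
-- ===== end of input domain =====

-- B replaces A's inner linear scan over all existing groups by a spatial hash grid (cell
-- size max(max_razdalja, 1)), inspecting only the 9 neighbouring cells of the incoming box.

-- ===== PORT A =====
def soSosednje (s1 s2 : Int × Int × Int × Int) (m : Int) : Bool :=
  decide (max |s1.1 - s2.1| |s1.2.1 - s2.2.1| ≤ m)

-- zdruzi(skatli); A only ever calls it on a two-element list, where Python's min/max of a
-- nonempty list never raise, so min?/max? are `some` there and `.getD 0` is exact.
def zdruziA (skatli : List ((Int × Int × Int × Int) × Int)) : Int × Int × Int × Int :=
  let xc := skatli.map (fun s => s.1.1)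
  let yc := skatli.map (fun s => s.1.2.1)
  let ws := skatli.map (fun s => s.1.2.2.1)
  let hs := skatli.map (fun s => s.1.2.2.2)
  let xmin := (PySem.List.min? xc (fun v => v)).getD 0
  let ymin := (PySem.List.min? yc (fun v => v)).getD 0
  let xmax := (PySem.List.max? xc (fun v => v)).getD 0 + (PySem.List.max? ws (fun v => v)).getD 0
  let ymax := (PySem.List.max? yc (fun v => v)).getD 0 + (PySem.List.max? hs (fun v => v)).getD 0
  (xmin, ymin, xmax - xmin, ymax - ymin)

-- the inner `for i, z in enumerate(zdruzeni): … break` loop: the first index whose group matches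
def najdiA (t : (Int × Int × Int × Int) × Int) (m : Int) :
    List ((Int × Int × Int × Int) × Int) → Nat → Option (Nat × ((Int × Int × Int × Int) × Int))
  | [], _ => none
  | z :: rest, i => if soSosednje t.1 z.1 m then some (i, z) else najdiA t m rest (i + 1)

-- one iteration of the outer `for trenutna in skatle[1:]` loop
def korakA (zd : List ((Int × Int × Int × Int) × Int)) (t : (Int × Int × Int × Int) × Int)
    (m : Int) : List ((Int × Int × Int × Int) × Int) :=
  match najdiA t m zd 0 with
  | some (i, z) => zd.set i (zdruziA [t, z], 0)
  | none => zd ++ [t]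

def zdruzi_sosednje_skatle (skatle : List ((Int × Int × Int × Int) × Int)) (max_razdalja : Int) :
    List ((Int × Int × Int × Int) × Int) :=
  match skatle with
  | [] => []
  | prvi :: rest => rest.foldl (fun zd t => korakA zd t max_razdalja) [prvi]

-- ===== PORT B =====
-- candidate filter `max(abs(x - groups[i][0][0]), abs(y - groups[i][0][1])) <= max_razdalja`;
-- the grid only ever holds in-range indices, so `groups[i]?` is `some` wherever Source B reads it.
def ujemaB (groups : List ((Int × Int × Int × Int) × Int)) (x y m : Int) (i : Nat) : Bool :=
  match groups[i]? with
  | some g => decide (max |x - g.1.1| |y - g.1.2.1| ≤ m)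
  | none => false

-- Source B's list comprehension: matching group indices from the 9 neighbouring grid cells
def candsB (s m : Int) (groups : List ((Int × Int × Int × Int) × Int))
    (grid : PySem.Dict (Int × Int) (List Nat)) (x y : Int) : List Nat :=
  ([-1, 0, 1] : List Int).flatMap (fun dx =>
    ([-1, 0, 1] : List Int).flatMap (fun dy =>
      (grid.getD (PySem.Int.floordiv x s + dx, PySem.Int.floordiv y s + dy) []).filter
        (ujemaB groups x y m)))

-- one iteration of Source B's `for trenutna in skatle` loop (state: groups list + hash grid);
-- `grid[oldc].remove(i)`: i occurs exactly once there (grid invariant), so `.erase` is exact.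
def korakB (s m : Int)
    (st : List ((Int × Int × Int × Int) × Int) × PySem.Dict (Int × Int) (List Nat))
    (t : (Int × Int × Int × Int) × Int) :
    List ((Int × Int × Int × Int) × Int) × PySem.Dict (Int × Int) (List Nat) :=
  match PySem.List.min? (candsB s m st.1 st.2 t.1.1 t.1.2.1) (fun v => v) with
  | some i =>
    match st.1[i]? with
    | some g =>
      let nx := min t.1.1 g.1.1
      let ny := min t.1.2.1 g.1.2.1
      let merged := (nx, ny, max t.1.1 g.1.1 + max t.1.2.2.1 g.1.2.2.1 - nx,
                     max t.1.2.1 g.1.2.1 + max t.1.2.2.2 g.1.2.2.2 - ny)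
      let oldc := (PySem.Int.floordiv g.1.1 s, PySem.Int.floordiv g.1.2.1 s)
      let grid1 := st.2.insert oldc ((st.2.getD oldc []).erase i)
      let newc := (PySem.Int.floordiv nx s, PySem.Int.floordiv ny s)
      (st.1.set i (merged, 0), grid1.insert newc ((grid1.getD newc []) ++ [i]))
    | none => st  -- unreachable: the grid only holds in-range indices
  | none =>
    (st.1 ++ [t],
     st.2.insert (PySem.Int.floordiv t.1.1 s, PySem.Int.floordiv t.1.2.1 s)
       ((st.2.getD (PySem.Int.floordiv t.1.1 s, PySem.Int.floordiv t.1.2.1 s) []) ++ [st.1.length]))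

def zdruzi_sosednje_skatle_alt (skatle : List ((Int × Int × Int × Int) × Int))
    (max_razdalja : Int) : List ((Int × Int × Int × Int) × Int) :=
  let s := if 0 < max_razdalja then max_razdalja else 1
  (skatle.foldl (korakB s max_razdalja) ([], PySem.Dict.empty)).1

-- ===== PRECONDITION & SPEC =====
def Spec_zdruzi_sosednje_skatle (skatle : List ((Int × Int × Int × Int) × Int)) (max_razdalja : Int) (out : List ((Int × Int × Int × Int) × Int)) : Prop := out = zdruzi_sosednje_skatle_alt skatle max_razdalja
instance (skatle : List ((Int × Int × Int × Int) × Int)) (max_razdalja : Int) (out : List ((Int × Int × Int × Int) × Int)) : Decidable (Spec_zdruzi_sosednje_skatle skatle max_razdalja out) := by unfold Spec_zdruzi_sosednje_skatle; infer_instance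

-- ===== CLAIM (what is proved, stated in full; the proofs are below) =====
def Claim_equal_zdruzi_sosednje_skatle : Prop := ∀ (skatle : List ((Int × Int × Int × Int) × Int)) (max_razdalja : Int), Dom_zdruzi_sosednje_skatle skatle max_razdalja → Spec_zdruzi_sosednje_skatle skatle max_razdalja (zdruzi_sosednje_skatle skatle max_razdalja)

-- ===== LEMMAS AND PROOFS =====

-- grid invariant: each cell's list is duplicate-free and holds exactly the indices of the
-- current groups whose (x, y) corner falls in that cell
def GridInv (s : Int) (groups : List ((Int × Int × Int × Int) × Int))
    (grid : PySem.Dict (Int × Int) (List Nat)) : Prop :=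
  ∀ c : Int × Int, (grid.getD c []).Nodup ∧
    ∀ i : Nat, i ∈ grid.getD c [] ↔
      ∃ g, groups[i]? = some g ∧
        (PySem.Int.floordiv g.1.1 s, PySem.Int.floordiv g.1.2.1 s) = c

lemma GridInv_empty (s : Int) : GridInv s [] PySem.Dict.empty := by
  intro c
  constructor
  · simp [PySem.Dict.getD_empty]
  · intro i; simp [PySem.Dict.getD_empty]

-- floor-division neighbourhood: if |x - g| ≤ s (0 < s) then g/s is within 1 of x/s
lemma floordiv_near {x g s : Int} (hs : 0 < s) (h : |x - g| ≤ s) :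
    PySem.Int.floordiv x s - 1 ≤ PySem.Int.floordiv g s ∧
    PySem.Int.floordiv g s ≤ PySem.Int.floordiv x s + 1 := by
  rw [PySem.Int.floordiv_eq_ediv_of_pos hs, PySem.Int.floordiv_eq_ediv_of_pos hs]
  have h1 : x - s ≤ g := by have := abs_le.mp h; omega
  have h2 : g ≤ x + s := by have := abs_le.mp h; omega
  constructor
  · have h3 := Int.ediv_le_ediv hs h1
    have hx : (x + (-1) * s) / s = x / s + (-1) := Int.add_mul_ediv_right x (-1) (by omega)
    have he : x + (-1) * s = x - s := by ring
    rw [he] at hx; omega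
  · have h3 := Int.ediv_le_ediv hs h2
    have hx : (x + 1 * s) / s = x / s + 1 := Int.add_mul_ediv_right x 1 (by omega)
    have he : x + 1 * s = x + s := by ring
    rw [he] at hx; omega

lemma najdiA_none_iff (t : (Int × Int × Int × Int) × Int) (m : Int)
    (zd : List ((Int × Int × Int × Int) × Int)) (k : Nat) :
    najdiA t m zd k = none ↔ ∀ z ∈ zd, soSosednje t.1 z.1 m = false := by
  induction zd generalizing k with
  | nil => simp [najdiA]
  | cons z rest ih =>
    cases h : soSosednje t.1 z.1 m with
    | true => simp [najdiA, h]
    | false => simp [najdiA, h, ih (k + 1)]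

lemma najdiA_some_spec (t : (Int × Int × Int × Int) × Int) (m : Int)
    (zd : List ((Int × Int × Int × Int) × Int)) (k i : Nat)
    (z : (Int × Int × Int × Int) × Int) (h : najdiA t m zd k = some (i, z)) :
    ∃ j, i = k + j ∧ zd[j]? = some z ∧ soSosednje t.1 z.1 m = true ∧
      ∀ j' < j, ∀ z', zd[j']? = some z' → soSosednje t.1 z'.1 m = false := by
  induction zd generalizing k with
  | nil => simp [najdiA] at h
  | cons a rest ih =>
    cases ha : soSosednje t.1 a.1 m with
    | true =>
      simp [najdiA, ha] at h
      refine ⟨0, by omega, by simp [h.2.symm], by rw [← h.2]; exact ha, by omega⟩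
    | false =>
      have h' : najdiA t m rest (k + 1) = some (i, z) := by simpa [najdiA, ha] using h
      rcases ih (k + 1) h' with ⟨j, hj, hz, hp, hmin⟩
      refine ⟨j + 1, by omega, by simpa using hz, hp, ?_⟩
      intro j' hj' z' hz'
      cases j' with
      | zero => simp at hz'; rw [← hz']; exact ha
      | succ j'' => exact hmin j'' (by omega) z' (by simpa using hz')

lemma mem_candsB_iff (s m : Int) (hs : 0 < s) (hms : m ≤ s)
    (groups : List ((Int × Int × Int × Int) × Int)) (grid : PySem.Dict (Int × Int) (List Nat))
    (hInv : GridInv s groups grid) (t : (Int × Int × Int × Int) × Int) (i : Nat) :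
    i ∈ candsB s m groups grid t.1.1 t.1.2.1 ↔
      ∃ g, groups[i]? = some g ∧ soSosednje t.1 g.1 m = true := by
  constructor
  · intro h
    rcases List.mem_flatMap.mp h with ⟨dx, _, h⟩
    rcases List.mem_flatMap.mp h with ⟨dy, _, h⟩
    rcases List.mem_filter.mp h with ⟨hmem, hpred⟩
    rcases ((hInv _).2 i).mp hmem with ⟨g, hg, _⟩
    refine ⟨g, hg, ?_⟩
    unfold ujemaB at hpred; rw [hg] at hpred
    simpa [soSosednje] using hpred
  · rintro ⟨g, hg, hpred⟩
    have hle : max |t.1.1 - g.1.1| |t.1.2.1 - g.1.2.1| ≤ m := by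
      simpa [soSosednje] using hpred
    have hx : |t.1.1 - g.1.1| ≤ s := le_trans (le_trans (le_max_left _ _) hle) hms
    have hy : |t.1.2.1 - g.1.2.1| ≤ s := le_trans (le_trans (le_max_right _ _) hle) hms
    obtain ⟨hx1, hx2⟩ := floordiv_near hs hx
    obtain ⟨hy1, hy2⟩ := floordiv_near hs hy
    unfold candsB
    refine List.mem_flatMap.mpr
      ⟨PySem.Int.floordiv g.1.1 s - PySem.Int.floordiv t.1.1 s, by simp; omega, ?_⟩
    refine List.mem_flatMap.mpr
      ⟨PySem.Int.floordiv g.1.2.1 s - PySem.Int.floordiv t.1.2.1 s, by simp; omega, ?_⟩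
    have e1 : PySem.Int.floordiv t.1.1 s +
        (PySem.Int.floordiv g.1.1 s - PySem.Int.floordiv t.1.1 s) =
        PySem.Int.floordiv g.1.1 s := by ring
    have e2 : PySem.Int.floordiv t.1.2.1 s +
        (PySem.Int.floordiv g.1.2.1 s - PySem.Int.floordiv t.1.2.1 s) =
        PySem.Int.floordiv g.1.2.1 s := by ring
    rw [e1, e2]
    refine List.mem_filter.mpr ⟨((hInv _).2 i).mpr ⟨g, hg, rfl⟩, ?_⟩
    unfold ujemaB; rw [hg]
    exact decide_eq_true hle

lemma min?_none_iff (s m : Int) (hs : 0 < s) (hms : m ≤ s)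
    (groups : List ((Int × Int × Int × Int) × Int)) (grid : PySem.Dict (Int × Int) (List Nat))
    (hInv : GridInv s groups grid) (t : (Int × Int × Int × Int) × Int) :
    PySem.List.min? (candsB s m groups grid t.1.1 t.1.2.1) (fun v => v) = none ↔
      najdiA t m groups 0 = none := by
  rw [PySem.List.min?_eq_none_iff _ _, najdiA_none_iff, List.eq_nil_iff_forall_not_mem]
  constructor
  · intro h z hz
    by_contra hp
    rcases List.mem_iff_getElem?.mp hz with ⟨j, hj⟩
    exact h j ((mem_candsB_iff s m hs hms groups grid hInv t j).mpr
      ⟨z, hj, by simpa using hp⟩)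
  · intro h i hi
    rcases (mem_candsB_iff s m hs hms groups grid hInv t i).mp hi with ⟨g, hg, hp⟩
    have := h g (List.mem_of_getElem? hg)
    rw [this] at hp; simp at hp

lemma min?_some_najdiA (s m : Int) (hs : 0 < s) (hms : m ≤ s)
    (groups : List ((Int × Int × Int × Int) × Int)) (grid : PySem.Dict (Int × Int) (List Nat))
    (hInv : GridInv s groups grid) (t : (Int × Int × Int × Int) × Int) (i : Nat)
    (hmin : PySem.List.min? (candsB s m groups grid t.1.1 t.1.2.1) (fun v => v) = some i) :
    ∃ g, groups[i]? = some g ∧ najdiA t m groups 0 = some (i, g) := by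
  have hi := PySem.List.min?_mem hmin
  obtain ⟨g, hg, hpred⟩ := (mem_candsB_iff s m hs hms groups grid hInv t i).mp hi
  have hnn : najdiA t m groups 0 ≠ none := by
    intro hnone
    have := (najdiA_none_iff t m groups 0).mp hnone g (List.mem_of_getElem? hg)
    rw [hpred] at this; simp at this
  obtain ⟨⟨i', z⟩, hsome⟩ := Option.ne_none_iff_exists'.mp hnn
  obtain ⟨j, hj0, hzj, hpz, hminl⟩ := najdiA_some_spec t m groups 0 i' z hsome
  have hji : i' = j := by omega
  subst hji
  have hi'c : i' ∈ candsB s m groups grid t.1.1 t.1.2.1 :=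
    (mem_candsB_iff s m hs hms groups grid hInv t i').mpr ⟨z, hzj, hpz⟩
  have h1 : i ≤ i' := PySem.List.min?_isMin hmin _ hi'c
  have h2 : ¬ i < i' := by
    intro hlt
    have := hminl i hlt g hg
    rw [hpred] at this; simp at this
  have : i = i' := by omega
  subst this
  rw [hg] at hzj
  have hzg : z = g := (Option.some_inj.mp hzj).symm
  rw [hzg] at hsome
  exact ⟨g, hg, hsome⟩

lemma zdruziA_pair (a b : (Int × Int × Int × Int) × Int) :
    zdruziA [a, b] = (min a.1.1 b.1.1, min a.1.2.1 b.1.2.1,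
      max a.1.1 b.1.1 + max a.1.2.2.1 b.1.2.2.1 - min a.1.1 b.1.1,
      max a.1.2.1 b.1.2.1 + max a.1.2.2.2 b.1.2.2.2 - min a.1.2.1 b.1.2.1) := by
  simp [zdruziA, PySem.List.min?_id_cons, PySem.List.max?_id_cons]

lemma GridInv_append (s : Int) (groups : List ((Int × Int × Int × Int) × Int))
    (grid : PySem.Dict (Int × Int) (List Nat)) (hInv : GridInv s groups grid)
    (t : (Int × Int × Int × Int) × Int) :
    GridInv s (groups ++ [t])
      (grid.insert (PySem.Int.floordiv t.1.1 s, PySem.Int.floordiv t.1.2.1 s)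
        ((grid.getD (PySem.Int.floordiv t.1.1 s, PySem.Int.floordiv t.1.2.1 s) []) ++
          [groups.length])) := by
  intro c
  rw [PySem.Dict.getD_insert]
  by_cases hc : c = (PySem.Int.floordiv t.1.1 s, PySem.Int.floordiv t.1.2.1 s)
  · subst hc
    rw [if_pos rfl]
    constructor
    · refine List.Nodup.append (hInv _).1 (List.nodup_singleton _) ?_
      intro a ha hb
      simp only [List.mem_singleton] at hb; subst hb
      rcases ((hInv _).2 _).mp ha with ⟨g, hg, _⟩
      have := (List.getElem?_eq_some_iff.mp hg).1; omega
    · intro i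
      rw [List.mem_append, List.mem_singleton]
      constructor
      · rintro (hi | hi)
        · rcases ((hInv _).2 i).mp hi with ⟨g, hg, hcell⟩
          have hlt := (List.getElem?_eq_some_iff.mp hg).1
          exact ⟨g, by rw [List.getElem?_append_left hlt]; exact hg, hcell⟩
        · subst hi
          exact ⟨t, List.getElem?_concat_length, rfl⟩
      · rintro ⟨g, hg, hcell⟩
        by_cases hlen : i < groups.length
        · rw [List.getElem?_append_left hlen] at hg
          exact Or.inl (((hInv _).2 i).mpr ⟨g, hg, hcell⟩)
        · right
          have hle : groups.length ≤ i := by omega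
          rw [List.getElem?_append_right hle] at hg
          rcases List.getElem?_eq_some_iff.mp hg with ⟨hlt, _⟩
          simp only [List.length_singleton] at hlt; omega
  · rw [if_neg hc]
    constructor
    · exact (hInv c).1
    · intro i
      rw [(hInv c).2 i]
      constructor
      · rintro ⟨g, hg, hcell⟩
        have hlt := (List.getElem?_eq_some_iff.mp hg).1
        exact ⟨g, by rw [List.getElem?_append_left hlt]; exact hg, hcell⟩
      · rintro ⟨g, hg, hcell⟩
        by_cases hlen : i < groups.length
        · rw [List.getElem?_append_left hlen] at hg
          exact ⟨g, hg, hcell⟩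
        · exfalso
          have hle : groups.length ≤ i := by omega
          rw [List.getElem?_append_right hle] at hg
          have h0 : i - groups.length = 0 := by
            rcases List.getElem?_eq_some_iff.mp hg with ⟨hlt, _⟩
            simp only [List.length_singleton] at hlt; omega
          rw [h0] at hg
          simp only [List.getElem?_cons_zero, Option.some_inj] at hg
          subst hg; exact hc hcell.symm

lemma GridInv_merge (s : Int) (groups : List ((Int × Int × Int × Int) × Int))
    (grid : PySem.Dict (Int × Int) (List Nat)) (hInv : GridInv s groups grid)
    (i : Nat) (g nb : (Int × Int × Int × Int) × Int) (hg : groups[i]? = some g) :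
    GridInv s (groups.set i nb)
      ((grid.insert (PySem.Int.floordiv g.1.1 s, PySem.Int.floordiv g.1.2.1 s)
          ((grid.getD (PySem.Int.floordiv g.1.1 s, PySem.Int.floordiv g.1.2.1 s) []).erase i)).insert
        (PySem.Int.floordiv nb.1.1 s, PySem.Int.floordiv nb.1.2.1 s)
        (((grid.insert (PySem.Int.floordiv g.1.1 s, PySem.Int.floordiv g.1.2.1 s)
          ((grid.getD (PySem.Int.floordiv g.1.1 s, PySem.Int.floordiv g.1.2.1 s) []).erase i)).getD
            (PySem.Int.floordiv nb.1.1 s, PySem.Int.floordiv nb.1.2.1 s) []) ++ [i])) := by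
  have hi_lt : i < groups.length := (List.getElem?_eq_some_iff.mp hg).1
  -- i appears only in the list of its own cell, once
  have hIOnly : ∀ c', i ∈ grid.getD c' [] →
      c' = (PySem.Int.floordiv g.1.1 s, PySem.Int.floordiv g.1.2.1 s) := by
    intro c' hmem
    rcases ((hInv c').2 i).mp hmem with ⟨g', hg', hcell⟩
    rw [hg] at hg'
    rw [← hcell, Option.some_inj.mp hg']
  -- i is nowhere in grid1
  have hNo1 : ∀ c', i ∉ (grid.insert (PySem.Int.floordiv g.1.1 s, PySem.Int.floordiv g.1.2.1 s)
      ((grid.getD (PySem.Int.floordiv g.1.1 s, PySem.Int.floordiv g.1.2.1 s) []).erase i)).getD c' [] := by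
    intro c' hmem
    rw [PySem.Dict.getD_insert] at hmem
    by_cases hc' : c' = (PySem.Int.floordiv g.1.1 s, PySem.Int.floordiv g.1.2.1 s)
    · rw [if_pos hc'] at hmem
      exact (((hInv _).1.mem_erase_iff).mp hmem).1 rfl
    · rw [if_neg hc'] at hmem
      exact hc' (hIOnly c' hmem)
  intro c
  rw [PySem.Dict.getD_insert]
  have hgetD1 : ∀ c', (grid.insert (PySem.Int.floordiv g.1.1 s, PySem.Int.floordiv g.1.2.1 s)
      ((grid.getD (PySem.Int.floordiv g.1.1 s, PySem.Int.floordiv g.1.2.1 s) []).erase i)).getD c' [] =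
      if c' = (PySem.Int.floordiv g.1.1 s, PySem.Int.floordiv g.1.2.1 s) then
        (grid.getD (PySem.Int.floordiv g.1.1 s, PySem.Int.floordiv g.1.2.1 s) []).erase i
      else grid.getD c' [] := fun c' => PySem.Dict.getD_insert _ _ _ _ _
  -- membership in grid1 for j ≠ i is membership in grid
  have hmem1 : ∀ c' (j : Nat), j ≠ i →
      (j ∈ (grid.insert (PySem.Int.floordiv g.1.1 s, PySem.Int.floordiv g.1.2.1 s)
        ((grid.getD (PySem.Int.floordiv g.1.1 s, PySem.Int.floordiv g.1.2.1 s) []).erase i)).getD c' []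
        ↔ j ∈ grid.getD c' []) := by
    intro c' j hj
    rw [hgetD1 c']
    by_cases hc' : c' = (PySem.Int.floordiv g.1.1 s, PySem.Int.floordiv g.1.2.1 s)
    · rw [if_pos hc', (hInv _).1.mem_erase_iff, hc']
      constructor
      · exact fun h => h.2
      · exact fun h => ⟨hj, h⟩
    · rw [if_neg hc']
  have hnodup1 : ∀ c', ((grid.insert (PySem.Int.floordiv g.1.1 s, PySem.Int.floordiv g.1.2.1 s)
      ((grid.getD (PySem.Int.floordiv g.1.1 s, PySem.Int.floordiv g.1.2.1 s) []).erase i)).getD c' []).Nodup := by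
    intro c'
    rw [hgetD1 c']
    by_cases hc' : c' = (PySem.Int.floordiv g.1.1 s, PySem.Int.floordiv g.1.2.1 s)
    · rw [if_pos hc']; exact (hInv _).1.erase i
    · rw [if_neg hc']; exact (hInv c').1
  have hset : ∀ j : Nat, (groups.set i nb)[j]? = if i = j then some nb else groups[j]? := by
    intro j
    rw [List.getElem?_set]
    by_cases hij : i = j
    · subst hij; simp [hi_lt]
    · simp [hij]
  by_cases hc : c = (PySem.Int.floordiv nb.1.1 s, PySem.Int.floordiv nb.1.2.1 s)
  · subst hc
    rw [if_pos rfl]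
    constructor
    · refine List.Nodup.append (hnodup1 _) (List.nodup_singleton _) ?_
      intro a ha hb
      simp only [List.mem_singleton] at hb; subst hb
      exact hNo1 _ ha
    · intro j
      rw [List.mem_append, List.mem_singleton]
      by_cases hj : j = i
      · subst hj
        constructor
        · intro _
          refine ⟨nb, ?_, rfl⟩
          rw [hset j, if_pos rfl]
        · intro _; right; rfl
      · constructor
        · rintro (hmem | hmem)
          · have := (hmem1 _ j hj).mp hmem
            rcases ((hInv (PySem.Int.floordiv nb.1.1 s, PySem.Int.floordiv nb.1.2.1 s)).2 j).mp this with ⟨g', hg', hcell⟩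
            refine ⟨g', ?_, hcell⟩
            rw [hset j, if_neg (fun h => hj h.symm)]; exact hg'
          · exact absurd hmem hj
        · rintro ⟨g', hg', hcell⟩
          rw [hset j, if_neg (fun h => hj h.symm)] at hg'
          left
          exact (hmem1 _ j hj).mpr (((hInv (PySem.Int.floordiv nb.1.1 s, PySem.Int.floordiv nb.1.2.1 s)).2 j).mpr ⟨g', hg', hcell⟩)
  · rw [if_neg hc]
    constructor
    · exact hnodup1 c
    · intro j
      by_cases hj : j = i
      · subst hj
        constructor
        · intro hmem; exact absurd hmem (hNo1 c)
        · rintro ⟨g', hg', hcell⟩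
          rw [hset j, if_pos rfl] at hg'
          have : g' = nb := (Option.some_inj.mp hg').symm
          subst this
          exact absurd hcell.symm hc
      · rw [hmem1 c j hj, (hInv c).2 j]
        constructor
        · rintro ⟨g', hg', hcell⟩
          refine ⟨g', ?_, hcell⟩
          rw [hset j, if_neg (fun h => hj h.symm)]; exact hg'
        · rintro ⟨g', hg', hcell⟩
          rw [hset j, if_neg (fun h => hj h.symm)] at hg'
          exact ⟨g', hg', hcell⟩

lemma korakB_fst (s m : Int) (hs : 0 < s) (hms : m ≤ s)
    (groups : List ((Int × Int × Int × Int) × Int)) (grid : PySem.Dict (Int × Int) (List Nat))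
    (hInv : GridInv s groups grid) (t : (Int × Int × Int × Int) × Int) :
    (korakB s m (groups, grid) t).1 = korakA groups t m ∧
      GridInv s (korakB s m (groups, grid) t).1 (korakB s m (groups, grid) t).2 := by
  cases hmin : PySem.List.min? (candsB s m groups grid t.1.1 t.1.2.1) (fun v => v) with
  | none =>
    have hA : najdiA t m groups 0 = none :=
      (min?_none_iff s m hs hms groups grid hInv t).mp hmin
    have hB : korakB s m (groups, grid) t =
        (groups ++ [t],
         grid.insert (PySem.Int.floordiv t.1.1 s, PySem.Int.floordiv t.1.2.1 s)
           ((grid.getD (PySem.Int.floordiv t.1.1 s, PySem.Int.floordiv t.1.2.1 s) []) ++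
             [groups.length])) := by
      unfold korakB; rw [hmin]
    rw [hB]
    constructor
    · unfold korakA; rw [hA]
    · exact GridInv_append s groups grid hInv t
  | some i =>
    obtain ⟨g, hg, hA⟩ := min?_some_najdiA s m hs hms groups grid hInv t i hmin
    have hB : korakB s m (groups, grid) t =
        (groups.set i
          ((min t.1.1 g.1.1, min t.1.2.1 g.1.2.1,
            max t.1.1 g.1.1 + max t.1.2.2.1 g.1.2.2.1 - min t.1.1 g.1.1,
            max t.1.2.1 g.1.2.1 + max t.1.2.2.2 g.1.2.2.2 - min t.1.2.1 g.1.2.1), 0),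
         (grid.insert (PySem.Int.floordiv g.1.1 s, PySem.Int.floordiv g.1.2.1 s)
            ((grid.getD (PySem.Int.floordiv g.1.1 s, PySem.Int.floordiv g.1.2.1 s) []).erase i)).insert
           (PySem.Int.floordiv (min t.1.1 g.1.1) s, PySem.Int.floordiv (min t.1.2.1 g.1.2.1) s)
           (((grid.insert (PySem.Int.floordiv g.1.1 s, PySem.Int.floordiv g.1.2.1 s)
              ((grid.getD (PySem.Int.floordiv g.1.1 s, PySem.Int.floordiv g.1.2.1 s) []).erase i)).getD
                (PySem.Int.floordiv (min t.1.1 g.1.1) s, PySem.Int.floordiv (min t.1.2.1 g.1.2.1) s) []) ++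
             [i])) := by
      unfold korakB; rw [hmin]; dsimp only; rw [hg]
    rw [hB]
    constructor
    · have hKA : korakA groups t m = groups.set i (zdruziA [t, g], 0) := by
        unfold korakA; rw [hA]
      rw [hKA, zdruziA_pair]
    · exact GridInv_merge s groups grid hInv i g _ hg

lemma fold_eq (s m : Int) (hs : 0 < s) (hms : m ≤ s)
    (l : List ((Int × Int × Int × Int) × Int)) :
    ∀ groups grid, GridInv s groups grid →
      (l.foldl (korakB s m) (groups, grid)).1 = l.foldl (fun zd t => korakA zd t m) groups := by
  induction l with
  | nil => intro groups grid _; rfl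
  | cons t rest ih =>
    intro groups grid hInv
    rcases korakB_fst s m hs hms groups grid hInv t with ⟨h1, h2⟩
    have hsp : korakB s m (groups, grid) t =
        ((korakB s m (groups, grid) t).1, (korakB s m (groups, grid) t).2) := rfl
    simp only [List.foldl_cons]
    rw [hsp, ih _ _ h2, h1]

lemma alt_eq_fold (skatle : List ((Int × Int × Int × Int) × Int)) (m : Int) :
    zdruzi_sosednje_skatle_alt skatle m =
      skatle.foldl (fun zd t => korakA zd t m) [] := by
  unfold zdruzi_sosednje_skatle_alt
  have hs : 0 < (if 0 < m then m else 1) := by split <;> omega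
  have hms : m ≤ (if 0 < m then m else 1) := by split <;> omega
  exact fold_eq _ m hs hms skatle [] _ (GridInv_empty _)

-- ===== VERDICT (by name: the statement is the Claim_ definition above) =====
theorem zdruzi_sosednje_skatle_spec : Claim_equal_zdruzi_sosednje_skatle := by
  intro skatle m _
  unfold Spec_zdruzi_sosednje_skatle
  rw [alt_eq_fold]
  cases skatle with
  | nil => rfl
  | cons p rest =>
    unfold zdruzi_sosednje_skatle
    simp only [List.foldl_cons]
    rfl
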